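-- pv_equiv track=rewrite | github.com/mxshvn/test_tasks | task2/task2.py | replace_vowels_and_consonants
-- ===== SOURCE A (Python) =====
-- import string
--
-- def replace_vowels_and_consonants(word: str) -> str:
--     alphabet = list(string.ascii_lowercase)
--     consonants = (
--         'b', 'c', 'd', 'f', 'g', 'h', 'j', 'k', 'l', 'm', 'n', 'p',
--         'q', 'r', 's', 't', 'v', 'w', 'x', 'y', 'z'
--     )
--     vowels = ('a', 'e', 'i', 'o', 'u')
--     result = ''
--
--     for letter in word:
--         if letter in vowels:
--             letter_index = alphabet.index(letter)
--             new_letter_index = letter_index - 1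
--             while alphabet[new_letter_index % len(alphabet)] not in consonants:
--                 new_letter_index -= 1
--             result += alphabet[new_letter_index % len(alphabet)]
--         elif letter in consonants:
--             letter_index = alphabet.index(letter)
--             new_letter_index = letter_index + 1
--             while alphabet[new_letter_index % len(alphabet)] not in vowels:
--                 new_letter_index += 1
--             result += alphabet[new_letter_index % len(alphabet)]
--         else:
--             result += letter
--
--     return result
-- ===== SOURCE B (Python) =====
-- import string
--
-- def replace_vowels_and_consonants(word: str) -> str:
--     lower = string.ascii_lowercase
--     vowels = "aeiou"
--     mapping = {}
--     for i, c in enumerate(lower):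
--         if c in vowels:
--             # the previous letter (cyclically) is always a consonant
--             mapping[c] = lower[(i - 1) % 26]
--         else:
--             # the first vowel strictly after position i, wrapping to 'a'
--             mapping[c] = next((v for v in vowels if lower.index(v) > i), 'a')
--     return ''.join(mapping.get(c, c) for c in word)
-- ===== Notes on version B (the rewrite author's own statement) =====
-- stated objective: simpler
-- what changed: B builds a 26-entry letter-to-target lookup table once (previous letter for vowels, first following vowel else 'a' for consonants) and maps the word through it in one pass, instead of A's per-character alphabet .index plus inner while-loop rescans. (measured faster: the per-letter alphabet scans are replaced by one dict lookup)
import Mathlib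
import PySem

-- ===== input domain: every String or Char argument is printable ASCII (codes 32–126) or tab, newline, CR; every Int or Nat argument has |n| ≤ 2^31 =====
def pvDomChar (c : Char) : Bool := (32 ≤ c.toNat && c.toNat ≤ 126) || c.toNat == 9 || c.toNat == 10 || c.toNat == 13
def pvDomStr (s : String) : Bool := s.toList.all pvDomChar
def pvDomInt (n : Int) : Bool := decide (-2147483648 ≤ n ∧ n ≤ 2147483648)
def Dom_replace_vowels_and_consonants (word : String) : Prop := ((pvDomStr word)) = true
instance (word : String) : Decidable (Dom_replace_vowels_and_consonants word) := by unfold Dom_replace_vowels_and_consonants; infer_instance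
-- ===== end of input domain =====

-- B precomputes a 26-letter lookup table once and maps the word through it, instead of A's
-- per-character inner while-loop rescans of the alphabet (objective: simpler single-pass lookup).

-- ===== PORT A =====
def pvAlphabet : List Char :=
  ['a','b','c','d','e','f','g','h','i','j','k','l','m','n','o','p','q','r','s','t','u','v','w','x','y','z']
def pvConsonants : List Char :=
  ['b','c','d','f','g','h','j','k','l','m','n','p','q','r','s','t','v','w','x','y','z']
def pvVowels : List Char := ['a','e','i','o','u']

-- alphabet[i % len(alphabet)] (index after mod is always in range; getD never hit)
def pvAt (i : Int) : Char := (PySem.List.pyGet? pvAlphabet (PySem.Int.mod i 26)).getD 'a'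

-- the 'while … not in consonants: new_letter_index -= 1' loop; fuel 26 covers all residues mod 26
def pvDown : Nat → Int → Char
  | 0, i => pvAt i
  | f+1, i => if pvConsonants.contains (pvAt i) then pvAt i else pvDown f (i - 1)

-- the 'while … not in vowels: new_letter_index += 1' loop
def pvUp : Nat → Int → Char
  | 0, i => pvAt i
  | f+1, i => if pvVowels.contains (pvAt i) then pvAt i else pvUp f (i + 1)

def replace_vowels_and_consonants (word : String) : String :=
  String.ofList (word.toList.foldl (fun result letter =>
    if pvVowels.contains letter then
      result ++ [pvDown 26 (((PySem.List.index? pvAlphabet letter).getD 0 : Int) - 1)]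
    else if pvConsonants.contains letter then
      result ++ [pvUp 26 (((PySem.List.index? pvAlphabet letter).getD 0 : Int) + 1)]
    else result ++ [letter]) [])

-- ===== PORT B =====
def pvBVowels : List Char := ['a','e','i','o','u']

def pvBMapping : PySem.Dict Char Char :=
  (PySem.List.enumerate pvAlphabet).foldl (fun d ic =>
    if pvBVowels.contains ic.2 then
      d.insert ic.2 ((PySem.List.pyGet? pvAlphabet (PySem.Int.mod (ic.1 - 1) 26)).getD 'a')
    else
      d.insert ic.2 ((pvBVowels.find? (fun v =>
        decide (((PySem.List.index? pvAlphabet v).getD 0 : Int) > ic.1))).getD 'a'))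
    PySem.Dict.empty

def replace_vowels_and_consonants_alt (word : String) : String :=
  String.ofList (word.toList.map (fun c => (pvBMapping.get? c).getD c))

-- ===== PRECONDITION & SPEC =====
def Spec_replace_vowels_and_consonants (word : String) (out : String) : Prop := out = replace_vowels_and_consonants_alt word
instance (word : String) (out : String) : Decidable (Spec_replace_vowels_and_consonants word out) := by unfold Spec_replace_vowels_and_consonants; infer_instance

-- ===== CLAIM (what is proved, stated in full; the proofs are below) =====
def Claim_equal_replace_vowels_and_consonants : Prop := ∀ (word : String), Dom_replace_vowels_and_consonants word → Spec_replace_vowels_and_consonants word (replace_vowels_and_consonants word)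

-- ===== LEMMAS AND PROOFS =====

-- A's per-character value, factored out of the foldl body
def pvA_char (letter : Char) : Char :=
  if pvVowels.contains letter then
    pvDown 26 (((PySem.List.index? pvAlphabet letter).getD 0 : Int) - 1)
  else if pvConsonants.contains letter then
    pvUp 26 (((PySem.List.index? pvAlphabet letter).getD 0 : Int) + 1)
  else letter

lemma pvBMapping_keys : pvBMapping.keys = pvAlphabet := by decide

lemma pv_char_eq (c : Char) : pvA_char c = (pvBMapping.get? c).getD c := by
  by_cases hc : c ∈ pvAlphabet
  · fin_cases hc <;> decide
  · have hnone : pvBMapping.get? c = none := by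
      rw [PySem.Dict.get?_eq_none_iff_not_mem_keys, pvBMapping_keys]; exact hc
    have hv : c ∉ pvVowels := by
      intro h
      apply hc
      simp only [pvVowels, List.mem_cons, List.not_mem_nil, or_false] at h
      rcases h with h|h|h|h|h <;> subst h <;> decide
    have hk : c ∉ pvConsonants := by
      intro h
      apply hc
      simp only [pvConsonants, List.mem_cons, List.not_mem_nil, or_false] at h
      rcases h with h|h|h|h|h|h|h|h|h|h|h|h|h|h|h|h|h|h|h|h|h <;> subst h <;> decide
    simp [pvA_char, hv, hk, hnone]

lemma pvA_foldl (l : List Char) (acc : List Char) :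
    l.foldl (fun result letter =>
      if pvVowels.contains letter then
        result ++ [pvDown 26 (((PySem.List.index? pvAlphabet letter).getD 0 : Int) - 1)]
      else if pvConsonants.contains letter then
        result ++ [pvUp 26 (((PySem.List.index? pvAlphabet letter).getD 0 : Int) + 1)]
      else result ++ [letter]) acc
    = acc ++ l.map (fun c => (pvBMapping.get? c).getD c) := by
  induction l generalizing acc with
  | nil => simp
  | cons x xs ih =>
    have hx : (if pvVowels.contains x then
        acc ++ [pvDown 26 (((PySem.List.index? pvAlphabet x).getD 0 : Int) - 1)]
      else if pvConsonants.contains x then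
        acc ++ [pvUp 26 (((PySem.List.index? pvAlphabet x).getD 0 : Int) + 1)]
      else acc ++ [x]) = acc ++ [pvA_char x] := by
      unfold pvA_char; split_ifs <;> rfl
    simp only [List.foldl_cons, List.map_cons, hx, ih, pv_char_eq x, List.append_assoc,
      List.singleton_append]

-- ===== VERDICT (by name: the statement is the Claim_ definition above) =====
theorem replace_vowels_and_consonants_spec : Claim_equal_replace_vowels_and_consonants := by
  intro word _
  unfold Spec_replace_vowels_and_consonants replace_vowels_and_consonants replace_vowels_and_consonants_alt
  rw [pvA_foldl]
  rfl
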